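-- pv_equiv track=rewrite | github.com/rot226/LoRaFlexSim-1.0.1 | article_c/plot_cluster_der.py | _resolve_der_source
-- ===== SOURCE A (Python) =====
-- def _resolve_der_source(rows: list[dict[str, object]]) -> tuple[str, str]:
--     for key in ("der_mean", "der", "der_p50", "der_p90", "der_p10"):
--         if any(key in row for row in rows):
--             return "direct", key
--     for key in ("pdr_mean", "pdr", "pdr_p50", "pdr_p90", "pdr_p10"):
--         if any(key in row for row in rows):
--             return "pdr", key
--     raise ValueError("Impossible de trouver une colonne DER/PDR dans les CSV.")
-- ===== SOURCE B (Python) =====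
-- _ORDER = ("der_mean", "der", "der_p50", "der_p90", "der_p10",
--           "pdr_mean", "pdr", "pdr_p50", "pdr_p90", "pdr_p10")
--
--
-- def _resolve_der_source(rows: list[dict[str, object]]) -> tuple[str, str]:
--     priority = {key: i for i, key in enumerate(_ORDER)}
--     best = 10
--     for row in rows:
--         for key in row:
--             r = priority.get(key, 10)
--             if r < best:
--                 best = r
--     if best == 10:
--         raise ValueError("Impossible de trouver une colonne DER/PDR dans les CSV.")
--     return ("direct" if best < 5 else "pdr"), _ORDER[best]
-- ===== Notes on version B (the rewrite author's own statement) =====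
-- stated objective: faster
-- what changed: B makes a single pass over the data keeping the minimum priority rank seen (via a key->rank dict), then decodes that rank into the answer, instead of A's one full scan of all rows per candidate key in priority order.
import Mathlib
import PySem

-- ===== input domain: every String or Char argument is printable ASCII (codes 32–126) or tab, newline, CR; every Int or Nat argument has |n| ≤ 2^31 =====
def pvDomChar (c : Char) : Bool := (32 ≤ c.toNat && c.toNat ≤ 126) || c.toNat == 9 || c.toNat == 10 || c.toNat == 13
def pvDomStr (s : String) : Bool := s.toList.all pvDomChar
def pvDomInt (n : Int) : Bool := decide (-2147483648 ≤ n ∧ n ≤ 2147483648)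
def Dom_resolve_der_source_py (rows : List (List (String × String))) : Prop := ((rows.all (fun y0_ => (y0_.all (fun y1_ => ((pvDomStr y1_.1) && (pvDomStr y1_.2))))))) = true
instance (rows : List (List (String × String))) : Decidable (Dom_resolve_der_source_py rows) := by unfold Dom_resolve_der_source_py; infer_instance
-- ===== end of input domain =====

-- B replaces A's scan of all rows per candidate key by ONE pass over the data keeping the minimum
-- priority rank seen (key→rank dict), then decodes that rank into the answer (objective: faster).
-- Both Pythons raise the same ValueError when no DER/PDR key occurs; Pre_ excludes exactly those inputs.

-- ===== PORT A =====
-- A: for each priority key, 'any(key in row for row in rows)' = scan all rows for that key.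
def pvHasKeyA (rows : List (List (String × String))) (key : String) : Bool :=
  rows.any (fun row => row.any (fun p => p.1 == key))

def resolve_der_source_py (rows : List (List (String × String))) : String × String :=
  match (["der_mean", "der", "der_p50", "der_p90", "der_p10"]).find? (pvHasKeyA rows) with
  | some key => ("direct", key)
  | none =>
    match (["pdr_mean", "pdr", "pdr_p50", "pdr_p90", "pdr_p10"]).find? (pvHasKeyA rows) with
    | some key => ("pdr", key)
    | none => ("", "")  -- Python: raise ValueError — excluded by Pre_

-- ===== PORT B =====
-- B: _ORDER tuple; priority = {key: i for i, key in enumerate(_ORDER)}; one pass keeping the minimum rank.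
def pvOrder : List String :=
  ["der_mean", "der", "der_p50", "der_p90", "der_p10",
   "pdr_mean", "pdr", "pdr_p50", "pdr_p90", "pdr_p10"]

def pvPrio : PySem.Dict String Int :=
  PySem.Dict.ofList ((PySem.List.enumerate pvOrder).map (fun p => (p.2, p.1)))

def pvBest (rows : List (List (String × String))) : Int :=
  rows.foldl (fun best row =>
    row.foldl (fun best p =>
      let r := pvPrio.getD p.1 10   -- priority.get(key, 10)
      if r < best then r else best) best) 10

def resolve_der_source_py_alt (rows : List (List (String × String))) : String × String :=
  let best := pvBest rows
  if best == 10 then ("", "")  -- Python: raise ValueError — excluded by Pre_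
  else ((if best < 5 then "direct" else "pdr"), PySem.List.pyGetD pvOrder best "")  -- _ORDER[best], 0 ≤ best < 10

-- ===== PRECONDITION & SPEC =====
-- Pre_: at least one of the ten DER/PDR keys occurs in some row; otherwise Python A raises ValueError.
def Pre_resolve_der_source_py (rows : List (List (String × String))) : Prop :=
  ((["der_mean", "der", "der_p50", "der_p90", "der_p10",
     "pdr_mean", "pdr", "pdr_p50", "pdr_p90", "pdr_p10"]).any
    (fun key => rows.any (fun row => row.any (fun p => p.1 == key)))) = true
instance (rows : List (List (String × String))) : Decidable (Pre_resolve_der_source_py rows) := by unfold Pre_resolve_der_source_py; infer_instance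

def pvWitness_resolve_der_source_py : (List (List (String × String))) := [[("der", "0.5")]]

def Spec_resolve_der_source_py (rows : List (List (String × String))) (out : String × String) : Prop := out = resolve_der_source_py_alt rows
instance (rows : List (List (String × String))) (out : String × String) : Decidable (Spec_resolve_der_source_py rows out) := by unfold Spec_resolve_der_source_py; infer_instance

-- ===== CLAIM (what is proved, stated in full; the proofs are below) =====
def Claim_equal_resolve_der_source_py : Prop := ∀ (rows : List (List (String × String))), Dom_resolve_der_source_py rows → Pre_resolve_der_source_py rows → Spec_resolve_der_source_py rows (resolve_der_source_py rows)

-- ===== LEMMAS AND PROOFS =====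

-- rank of a key in B's priority dict (proof-side abbreviation; defeq to the step inside pvBest)
def pvRank (k : String) : Int := pvPrio.getD k 10

-- B's nested fold over rows equals the min-rank fold over the flattened key list
theorem pvFlat_aux (step : Int → String → Int) :
    ∀ (rows : List (List (String × String))) (b : Int),
    rows.foldl (fun best row => row.foldl (fun best p => step best p.1) best) b
      = (rows.flatMap (fun row => row.map Prod.fst)).foldl step b := by
  intro rows
  induction rows with
  | nil => intro b; rfl
  | cons r rs ih =>
    intro b
    simp only [List.foldl_cons, List.flatMap_cons, List.foldl_append, ih, List.foldl_map]

theorem pvBest_eq_flat (rows : List (List (String × String))) :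
    pvBest rows = (rows.flatMap (fun row => row.map Prod.fst)).foldl
      (fun b k => if pvRank k < b then pvRank k else b) 10 :=
  pvFlat_aux (fun b k => if pvRank k < b then pvRank k else b) rows 10

-- the min-rank fold never exceeds its initial value
theorem pvM_le_init (ks : List String) : ∀ b : Int,
    ks.foldl (fun b k => if pvRank k < b then pvRank k else b) b ≤ b := by
  induction ks with
  | nil => intro b; simp
  | cons k ks ih =>
    intro b
    simp only [List.foldl_cons]
    refine le_trans (ih _) ?_
    split_ifs with h <;> omega

-- the min-rank fold is ≤ the rank of every listed key
theorem pvM_le_mem (ks : List String) : ∀ (b : Int) (k : String), k ∈ ks →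
    ks.foldl (fun b k => if pvRank k < b then pvRank k else b) b ≤ pvRank k := by
  induction ks with
  | nil => intro b k h; simp at h
  | cons k' ks ih =>
    intro b k hk
    simp only [List.foldl_cons]
    rcases List.mem_cons.mp hk with h | h
    · subst h
      refine le_trans (pvM_le_init ks _) ?_
      split_ifs with h <;> omega
    · exact ih _ k h

-- the min-rank fold is its initial value or the rank of some listed key
theorem pvM_cases (ks : List String) : ∀ b : Int,
    ks.foldl (fun b k => if pvRank k < b then pvRank k else b) b = b ∨
      ∃ k ∈ ks, ks.foldl (fun b k => if pvRank k < b then pvRank k else b) b = pvRank k := by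
  induction ks with
  | nil => intro b; left; rfl
  | cons k' ks ih =>
    intro b
    simp only [List.foldl_cons]
    rcases ih (if pvRank k' < b then pvRank k' else b) with h | ⟨k, hk, h⟩
    · rw [h]
      split_ifs with hc
      · exact Or.inr ⟨k', List.mem_cons_self, rfl⟩
      · exact Or.inl rfl
    · exact Or.inr ⟨k, List.mem_cons_of_mem _ hk, h⟩

-- every key's rank is 10 or a position in pvOrder
set_option maxHeartbeats 1000000 in
theorem pvRank_cases (k : String) :
    pvRank k = 10 ∨ ∃ i : Nat, i < 10 ∧ pvRank k = (i : Int) ∧ pvOrder.getD i "" = k := by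
  have h : pvPrio = PySem.Dict.mk [("der_mean",0),("der",1),("der_p50",2),("der_p90",3),("der_p10",4),("pdr_mean",5),("pdr",6),("pdr_p50",7),("pdr_p90",8),("pdr_p10",9)] := by rfl
  simp only [pvRank, h, PySem.Dict.getD_eq_get?_getD, PySem.Dict.get?_mk_cons]
  split_ifs with h0 h1 h2 h3 h4 h5 h6 h7 h8 h9
  · exact Or.inr ⟨0, by omega, by simp, by simp at h0; simp [pvOrder, ← h0]⟩
  · exact Or.inr ⟨1, by omega, by simp, by simp at h1; simp [pvOrder, ← h1]⟩
  · exact Or.inr ⟨2, by omega, by simp, by simp at h2; simp [pvOrder, ← h2]⟩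
  · exact Or.inr ⟨3, by omega, by simp, by simp at h3; simp [pvOrder, ← h3]⟩
  · exact Or.inr ⟨4, by omega, by simp, by simp at h4; simp [pvOrder, ← h4]⟩
  · exact Or.inr ⟨5, by omega, by simp, by simp at h5; simp [pvOrder, ← h5]⟩
  · exact Or.inr ⟨6, by omega, by simp, by simp at h6; simp [pvOrder, ← h6]⟩
  · exact Or.inr ⟨7, by omega, by simp, by simp at h7; simp [pvOrder, ← h7]⟩
  · exact Or.inr ⟨8, by omega, by simp, by simp at h8; simp [pvOrder, ← h8]⟩
  · exact Or.inr ⟨9, by omega, by simp, by simp at h9; simp [pvOrder, ← h9]⟩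
  · left; simp [PySem.Dict.get?]

-- the rank of the i-th priority key is i
theorem pvRank_order (i : Nat) (hi : i < 10) : pvRank (pvOrder.getD i "") = (i : Int) := by
  interval_cases i <;> rfl

-- A's per-key scan of all rows is membership in the flattened key list
theorem pvHasKeyA_iff_mem (rows : List (List (String × String))) (k : String) :
    pvHasKeyA rows k = true ↔ k ∈ rows.flatMap (fun row => row.map Prod.fst) := by
  simp [pvHasKeyA, List.any_eq_true, List.mem_flatMap, List.mem_map]

-- the minimum rank is i when the i-th priority key occurs and no earlier one does
theorem pvBest_eq_of_first (rows : List (List (String × String))) (i : Nat) (hi : i < 10)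
    (hhas : pvHasKeyA rows (pvOrder.getD i "") = true)
    (hnone : ∀ j : Nat, j < i → pvHasKeyA rows (pvOrder.getD j "") = false) :
    pvBest rows = (i : Int) := by
  rw [pvBest_eq_flat]
  have hmem := (pvHasKeyA_iff_mem rows _).mp hhas
  have hle : _ ≤ pvRank (pvOrder.getD i "") := pvM_le_mem _ 10 _ hmem
  rw [pvRank_order i hi] at hle
  rcases pvM_cases (rows.flatMap (fun row => row.map Prod.fst)) 10 with h | ⟨k, hk, h⟩
  · omega
  · rcases pvRank_cases k with hr | ⟨j, hj, hr, hko⟩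
    · omega
    · -- fold value is rank k = j; j cannot be < i (key j would occur), so j = i
      rw [h, hr]
      have hjk : pvHasKeyA rows (pvOrder.getD j "") = true := by
        rw [hko]; exact (pvHasKeyA_iff_mem rows k).mpr hk
      by_contra hne
      have hji : j < i := by
        rw [h, hr] at hle
        omega
      rw [hnone j hji] at hjk
      exact Bool.false_ne_true hjk

-- ===== VERDICT (by name: the statement is the Claim_ definition above) =====
theorem resolve_der_source_py_spec : Claim_equal_resolve_der_source_py := by
  intro rows _ hpre
  unfold Spec_resolve_der_source_py
  by_cases h0 : pvHasKeyA rows "der_mean" = true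
  · have hb : pvBest rows = 0 := pvBest_eq_of_first rows 0 (by omega) h0 (by omega)
    simp [resolve_der_source_py, resolve_der_source_py_alt, List.find?, h0, hb, pvOrder, PySem.List.pyGetD]
  · by_cases h1 : pvHasKeyA rows "der" = true
    · have hb : pvBest rows = 1 := pvBest_eq_of_first rows 1 (by omega) h1
        (by intro j hj; interval_cases j; simpa using h0)
      simp [resolve_der_source_py, resolve_der_source_py_alt, List.find?, h0, h1, hb, pvOrder, PySem.List.pyGetD]
    · by_cases h2 : pvHasKeyA rows "der_p50" = true
      · have hb : pvBest rows = 2 := pvBest_eq_of_first rows 2 (by omega) h2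
          (by intro j hj; interval_cases j <;> simp_all [pvOrder])
        simp [resolve_der_source_py, resolve_der_source_py_alt, List.find?, h0, h1, h2, hb, pvOrder, PySem.List.pyGetD]
      · by_cases h3 : pvHasKeyA rows "der_p90" = true
        · have hb : pvBest rows = 3 := pvBest_eq_of_first rows 3 (by omega) h3
            (by intro j hj; interval_cases j <;> simp_all [pvOrder])
          simp [resolve_der_source_py, resolve_der_source_py_alt, List.find?, h0, h1, h2, h3, hb, pvOrder, PySem.List.pyGetD]
        · by_cases h4 : pvHasKeyA rows "der_p10" = true
          · have hb : pvBest rows = 4 := pvBest_eq_of_first rows 4 (by omega) h4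
              (by intro j hj; interval_cases j <;> simp_all [pvOrder])
            simp [resolve_der_source_py, resolve_der_source_py_alt, List.find?, h0, h1, h2, h3, h4, hb, pvOrder, PySem.List.pyGetD]
          · by_cases h5 : pvHasKeyA rows "pdr_mean" = true
            · have hb : pvBest rows = 5 := pvBest_eq_of_first rows 5 (by omega) h5
                (by intro j hj; interval_cases j <;> simp_all [pvOrder])
              simp [resolve_der_source_py, resolve_der_source_py_alt, List.find?, h0, h1, h2, h3, h4, h5, hb, pvOrder, PySem.List.pyGetD]
            · by_cases h6 : pvHasKeyA rows "pdr" = true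
              · have hb : pvBest rows = 6 := pvBest_eq_of_first rows 6 (by omega) h6
                  (by intro j hj; interval_cases j <;> simp_all [pvOrder])
                simp [resolve_der_source_py, resolve_der_source_py_alt, List.find?, h0, h1, h2, h3, h4, h5, h6, hb, pvOrder, PySem.List.pyGetD]
              · by_cases h7 : pvHasKeyA rows "pdr_p50" = true
                · have hb : pvBest rows = 7 := pvBest_eq_of_first rows 7 (by omega) h7
                    (by intro j hj; interval_cases j <;> simp_all [pvOrder])
                  simp [resolve_der_source_py, resolve_der_source_py_alt, List.find?, h0, h1, h2, h3, h4, h5, h6, h7, hb, pvOrder, PySem.List.pyGetD]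
                · by_cases h8 : pvHasKeyA rows "pdr_p90" = true
                  · have hb : pvBest rows = 8 := pvBest_eq_of_first rows 8 (by omega) h8
                      (by intro j hj; interval_cases j <;> simp_all [pvOrder])
                    simp [resolve_der_source_py, resolve_der_source_py_alt, List.find?, h0, h1, h2, h3, h4, h5, h6, h7, h8, hb, pvOrder, PySem.List.pyGetD]
                  · by_cases h9 : pvHasKeyA rows "pdr_p10" = true
                    · have hb : pvBest rows = 9 := pvBest_eq_of_first rows 9 (by omega) h9
                        (by intro j hj; interval_cases j <;> simp_all [pvOrder])
                      simp [resolve_der_source_py, resolve_der_source_py_alt, List.find?, h0, h1, h2, h3, h4, h5, h6, h7, h8, h9, hb, pvOrder, PySem.List.pyGetD]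
                    · exfalso
                      unfold Pre_resolve_der_source_py at hpre
                      simp only [List.any_cons, List.any_nil, Bool.or_eq_true] at hpre
                      rcases hpre with h|h|h|h|h|h|h|h|h|h|h
                      · exact h0 h
                      · exact h1 h
                      · exact h2 h
                      · exact h3 h
                      · exact h4 h
                      · exact h5 h
                      · exact h6 h
                      · exact h7 h
                      · exact h8 h
                      · exact h9 h
                      · simp at h
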